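-- pv_equiv track=rewrite | github.com/bakhda777/coint4 | scripts/papers/ideas_to_experiments.py | _suggest_changes
-- ===== SOURCE A (Python) =====
-- def _suggest_changes(idea: str) -> list[str]:
--     text = idea.lower()
--     changes: list[str] = []
--
--     if any(token in text for token in ("cost", "fee", "slippage", "funding", "turnover")):
--         changes.extend(
--             [
--                 "coint4/src/coint2/pipeline/cost_model.py",
--                 "coint4/src/coint2/pipeline/walk_forward_orchestrator.py",
--                 "configs/*.yaml (backtest.cost_*)",
--             ]
--         )
--     if any(token in text for token in ("stop", "drawdown", "regime", "risk", "volatility")):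
--         changes.extend(
--             [
--                 "coint4/src/coint2/pipeline/walk_forward_orchestrator.py",
--                 "coint4/src/coint2/utils/config.py (backtest/portfolio risk params)",
--             ]
--         )
--     if any(token in text for token in ("kalman", "hedge", "ou", "half-life", "cointegration", "copula")):
--         changes.extend(
--             [
--                 "coint4/src/coint2/core/pair_backtester.py",
--                 "coint4/src/coint2/pipeline/filters.py",
--             ]
--         )
--
--     if not changes:
--         changes = [
--             "coint4/src/coint2/pipeline/walk_forward_orchestrator.py",
--             "configs/*.yaml",
--         ]
--
--     out: list[str] = []
--     for entry in changes:
--         if entry not in out: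
--             out.append(entry)
--     return out
-- ===== SOURCE B (Python) =====
-- KEYWORDS = [
--     ("cost", "fee", "slippage", "funding", "turnover"),
--     ("stop", "drawdown", "regime", "risk", "volatility"),
--     ("kalman", "hedge", "ou", "half-life", "cointegration", "copula"),
-- ]
--
-- # Every distinct suggested path, in first-occurrence order, tagged with the
-- # keyword groups that suggest it.
-- PATHS = [
--     ("coint4/src/coint2/pipeline/cost_model.py", {0}),
--     ("coint4/src/coint2/pipeline/walk_forward_orchestrator.py", {0, 1}),
--     ("configs/*.yaml (backtest.cost_*)", {0}),
--     ("coint4/src/coint2/utils/config.py (backtest/portfolio risk params)", {1}),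
--     ("coint4/src/coint2/core/pair_backtester.py", {2}),
--     ("coint4/src/coint2/pipeline/filters.py", {2}),
-- ]
--
-- FALLBACK = [
--     "coint4/src/coint2/pipeline/walk_forward_orchestrator.py",
--     "configs/*.yaml",
-- ]
--
--
-- def _suggest_changes(idea: str) -> list[str]:
--     text = idea.lower()
--     hits = {i for i, tokens in enumerate(KEYWORDS) if any(t in text for t in tokens)}
--     if not hits:
--         return list(FALLBACK)
--     return [path for path, owners in PATHS if owners & hits]
-- ===== Notes on version B (the rewrite author's own statement) =====
-- stated objective: alternative
-- what changed: Instead of concatenating per-rule suggestion lists and deduplicating, B computes the set of matched keyword groups and selects paths by filtering a canonical universe of the five distinct paths, each tagged with its owner groups (membership filter, no append/dedup).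
import Mathlib
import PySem

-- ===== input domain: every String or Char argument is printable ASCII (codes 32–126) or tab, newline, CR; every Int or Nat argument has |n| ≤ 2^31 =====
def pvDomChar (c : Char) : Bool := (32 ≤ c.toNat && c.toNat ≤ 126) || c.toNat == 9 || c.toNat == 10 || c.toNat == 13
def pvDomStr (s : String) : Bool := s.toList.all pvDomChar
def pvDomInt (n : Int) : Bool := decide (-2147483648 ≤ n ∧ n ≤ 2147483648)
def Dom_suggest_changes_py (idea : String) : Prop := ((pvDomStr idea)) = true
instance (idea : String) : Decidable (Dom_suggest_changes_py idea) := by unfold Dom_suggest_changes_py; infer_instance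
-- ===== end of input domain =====

-- B selects paths by filtering a tagged universe of distinct paths against the set of
-- matched keyword groups, instead of A's append-per-rule-then-dedup (objective: alternative).

-- shared helper: Python's  any(token in text for token in tokens)
def pvAnyTok (tokens : List String) (text : String) : Bool :=
  tokens.any (fun token => PySem.Str.isIn token text)

-- ===== PORT A =====
def suggest_changes_py (idea : String) : List String :=
  let text := PySem.Str.lower idea
  let changes : List String := []
  let changes :=
    if pvAnyTok ["cost", "fee", "slippage", "funding", "turnover"] text then
      changes ++
        [ "coint4/src/coint2/pipeline/cost_model.py",
          "coint4/src/coint2/pipeline/walk_forward_orchestrator.py",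
          "configs/*.yaml (backtest.cost_*)" ]
    else changes
  let changes :=
    if pvAnyTok ["stop", "drawdown", "regime", "risk", "volatility"] text then
      changes ++
        [ "coint4/src/coint2/pipeline/walk_forward_orchestrator.py",
          "coint4/src/coint2/utils/config.py (backtest/portfolio risk params)" ]
    else changes
  let changes :=
    if pvAnyTok ["kalman", "hedge", "ou", "half-life", "cointegration", "copula"] text then
      changes ++
        [ "coint4/src/coint2/core/pair_backtester.py",
          "coint4/src/coint2/pipeline/filters.py" ]
    else changes
  let changes :=
    if changes = [] then
      [ "coint4/src/coint2/pipeline/walk_forward_orchestrator.py",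
        "configs/*.yaml" ]
    else changes
  changes.foldl (fun out entry => if out.contains entry then out else out ++ [entry]) []

-- ===== PORT B =====
def pvKeywords : List (List String) :=
  [ ["cost", "fee", "slippage", "funding", "turnover"],
    ["stop", "drawdown", "regime", "risk", "volatility"],
    ["kalman", "hedge", "ou", "half-life", "cointegration", "copula"] ]

-- every distinct suggested path, in first-occurrence order, tagged with its owner groups
def pvPaths : List (String × PySem.Set Int) :=
  [ ("coint4/src/coint2/pipeline/cost_model.py", PySem.Set.ofList [0]),
    ("coint4/src/coint2/pipeline/walk_forward_orchestrator.py", PySem.Set.ofList [0, 1]),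
    ("configs/*.yaml (backtest.cost_*)", PySem.Set.ofList [0]),
    ("coint4/src/coint2/utils/config.py (backtest/portfolio risk params)", PySem.Set.ofList [1]),
    ("coint4/src/coint2/core/pair_backtester.py", PySem.Set.ofList [2]),
    ("coint4/src/coint2/pipeline/filters.py", PySem.Set.ofList [2]) ]

def pvFallback : List String :=
  [ "coint4/src/coint2/pipeline/walk_forward_orchestrator.py",
    "configs/*.yaml" ]

def suggest_changes_py_alt (idea : String) : List String :=
  let text := PySem.Str.lower idea
  -- hits = {i for i, tokens in enumerate(KEYWORDS) if any(t in text for t in tokens)}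
  let hits : PySem.Set Int :=
    PySem.Set.ofList
      (((PySem.List.enumerate pvKeywords 0).filter (fun p => pvAnyTok p.2 text)).map (fun p => p.1))
  if hits = [] then pvFallback
  else (pvPaths.filter (fun p => !(PySem.Set.inter p.2 hits).isEmpty)).map (fun p => p.1)

-- ===== PRECONDITION & SPEC =====
def Spec_suggest_changes_py (idea : String) (out : List String) : Prop := out = suggest_changes_py_alt idea
instance (idea : String) (out : List String) : Decidable (Spec_suggest_changes_py idea out) := by unfold Spec_suggest_changes_py; infer_instance

-- ===== CLAIM (what is proved, stated in full; the proofs are below) =====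
def Claim_equal_suggest_changes_py : Prop := ∀ (idea : String), Dom_suggest_changes_py idea → Spec_suggest_changes_py idea (suggest_changes_py idea)

-- ===== LEMMAS AND PROOFS =====

-- Both results depend on the input only through the three rule conditions; case split on them.
set_option maxHeartbeats 1000000 in
theorem suggest_changes_agree (idea : String) :
    suggest_changes_py idea = suggest_changes_py_alt idea := by
  simp only [suggest_changes_py, suggest_changes_py_alt, pvKeywords, pvPaths, pvFallback,
    PySem.List.enumerate_cons, PySem.List.enumerate_nil, List.filter]
  cases h1 : pvAnyTok ["cost", "fee", "slippage", "funding", "turnover"] (PySem.Str.lower idea) <;>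
  cases h2 : pvAnyTok ["stop", "drawdown", "regime", "risk", "volatility"] (PySem.Str.lower idea) <;>
  cases h3 : pvAnyTok ["kalman", "hedge", "ou", "half-life", "cointegration", "copula"] (PySem.Str.lower idea) <;>
    simp [PySem.Set.ofList, PySem.Set.add, PySem.Set.inter]

-- ===== VERDICT (by name: the statement is the Claim_ definition above) =====
theorem suggest_changes_py_spec : Claim_equal_suggest_changes_py := by
  intro idea _
  exact suggest_changes_agree idea
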